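-- pv_equiv track=rewrite | github.com/Louis-DR/TelociDesi | dec2ter.py | dec2terXtrit
-- ===== SOURCE A (Python) =====
-- def dec2ter(a,ntrits):
--     if a>=0 :
--         return dec2terAbs(a)
--     else :
--         a = int(((3**ntrits)-1)/2 - a)
--         return dec2terAbs(a)
--
-- def dec2terAbs(a) :
--     if a//3==0 : return [a%3]
--     else : return dec2terAbs(a//3)+[a%3]
--
-- def dec2terstr(list):
--     res = ''
--     for trit in list:
--         res = res + str(trit)
--     return res
--
-- def dec2terXtrit(number, ntrits):
--     temp = dec2terstr(dec2ter(number,ntrits))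
--     res = ""
--     if (len(temp)>0):
--         res = temp
--         for j in range (len(temp),ntrits):
--             res = "0"+res
--     return res
-- ===== SOURCE B (Python) =====
-- def dec2terXtrit(number, ntrits):
--     # value to encode: nonnegative numbers directly, negative ones offset by (3**ntrits - 1)//2
--     v = number if number >= 0 else (3**ntrits - 1)//2 - number
--     digits = []
--     while v > 0:
--         digits.append(v % 3)
--         v //= 3
--     s = ''.join(str(d) for d in reversed(digits)) or '0'
--     return s.rjust(ntrits, '0')
-- ===== Notes on version B (the rewrite author's own statement) =====
-- stated objective: faster
-- what changed: Replaces A's most-significant-first digit recursion plus two string-building loops (padding by prepending one char at a time, quadratic in ntrits) by one least-significant-first digit loop with reversal, a single join, and one rjust for the padding; the negative-number offset uses exact integer // instead of A's float /.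
-- outside the precondition, e.g. on dec2terXtrit(-5, -3): A returns '11', B returns '1.01.0'
import Mathlib
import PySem

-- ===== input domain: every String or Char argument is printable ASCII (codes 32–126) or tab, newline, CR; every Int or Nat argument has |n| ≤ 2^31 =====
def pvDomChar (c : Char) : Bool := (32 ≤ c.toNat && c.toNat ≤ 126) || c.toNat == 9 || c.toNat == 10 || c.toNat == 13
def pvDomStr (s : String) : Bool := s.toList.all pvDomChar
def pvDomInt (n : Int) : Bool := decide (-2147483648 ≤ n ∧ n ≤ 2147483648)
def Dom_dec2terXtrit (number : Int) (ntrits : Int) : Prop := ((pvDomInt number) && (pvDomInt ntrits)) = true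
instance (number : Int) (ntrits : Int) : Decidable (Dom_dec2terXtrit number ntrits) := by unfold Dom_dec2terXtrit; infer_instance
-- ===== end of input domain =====

-- B replaces A's most-significant-first recursion and two string loops by one
-- least-significant-first digit loop with reversal, one join and one rjust (A pads by prepending one char at a time; a timing run measured B faster).

-- ===== PORT A =====
-- dec2terAbs(a): the fuel argument only makes the Python recursion total; the
-- recursion terminates for every a ≥ 0 (the only values reachable under Pre_),
-- and a.toNat fuel is enough there.
def pvDec2terAbs : Nat → Int → List Int
  | 0, a => [PySem.Int.mod a 3]
  | f+1, a =>
      if PySem.Int.floordiv a 3 = 0 then [PySem.Int.mod a 3]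
      else pvDec2terAbs f (PySem.Int.floordiv a 3) ++ [PySem.Int.mod a 3]

-- dec2ter(a, ntrits); Python's int(((3**ntrits)-1)/2 - a) uses FLOAT division: it is
-- ported as exact integer arithmetic, exact on Pre_ (number ≥ 0 never reaches this
-- branch; otherwise 0 ≤ ntrits ≤ 34 keeps every intermediate float value exactly
-- representable, where /2 of the even number 3**ntrits - 1 is exact).
def pvDec2ter (a : Int) (ntrits : Int) : List Int :=
  if a ≥ 0 then pvDec2terAbs a.toNat a
  else
    let a' := PySem.Int.floordiv ((3:Int) ^ ntrits.toNat - 1) 2 - a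
    pvDec2terAbs a'.toNat a'

-- dec2terstr: res = res + str(trit), built on the char-list side (PySem convention)
def pvDec2terstr (l : List Int) : List Char :=
  l.foldl (fun res trit => res ++ PySem.Int.toChars trit) []

def dec2terXtrit (number : Int) (ntrits : Int) : String :=
  let temp := pvDec2terstr (pvDec2ter number ntrits)
  let res : List Char := []
  let res := if temp.length > 0 then
      (PySem.List.pyRange (temp.length : Int) ntrits 1).foldl (fun r _ => '0' :: r) temp
    else res
  String.mk res

-- ===== PORT B =====
-- while v > 0: digits.append(v % 3); v //= 3   (fuel only makes the loop total;
-- v.toNat + 1 iterations always suffice)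
def pvTrits : Nat → Int → List Int
  | 0, _ => []
  | f+1, v => if v > 0 then PySem.Int.mod v 3 :: pvTrits f (PySem.Int.floordiv v 3) else []

def dec2terXtrit_alt (number : Int) (ntrits : Int) : String :=
  let v := if number ≥ 0 then number
           else PySem.Int.floordiv ((3:Int) ^ ntrits.toNat - 1) 2 - number
  let ds := pvTrits (v.toNat + 1) v
  -- ''.join(str(d) for d in reversed(digits)) or '0'  (join with empty separator = concatenation)
  let s : List Char := if ds = [] then ['0'] else (ds.reverse.map PySem.Int.toChars).flatten
  -- s.rjust(ntrits, '0')
  String.mk (List.replicate (ntrits.toNat - s.length) '0' ++ s)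

-- ===== PRECONDITION & SPEC =====
-- Pre_ excludes inputs with number < 0 on which A's float expression (3**ntrits-1)/2 is an
-- artefact: for ntrits ≥ 35 the float division rounds (and for ntrits ≥ 648 A raises
-- OverflowError), and for ntrits < 0 the value comes from truncating a float power 3**ntrits.
def Pre_dec2terXtrit (number : Int) (ntrits : Int) : Prop :=
  0 ≤ number ∨ (0 ≤ ntrits ∧ ntrits ≤ 34)
instance (number : Int) (ntrits : Int) : Decidable (Pre_dec2terXtrit number ntrits) := by
  unfold Pre_dec2terXtrit; infer_instance

def pvWitness_dec2terXtrit : Int × Int := (-5, 4)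

def Spec_dec2terXtrit (number : Int) (ntrits : Int) (out : String) : Prop :=
  out = dec2terXtrit_alt number ntrits
instance (number : Int) (ntrits : Int) (out : String) : Decidable (Spec_dec2terXtrit number ntrits out) := by
  unfold Spec_dec2terXtrit; infer_instance

-- ===== CLAIM (what is proved, stated in full; the proofs are below) =====
def Claim_equal_dec2terXtrit : Prop := ∀ (number : Int) (ntrits : Int), Dom_dec2terXtrit number ntrits → Pre_dec2terXtrit number ntrits → Spec_dec2terXtrit number ntrits (dec2terXtrit number ntrits)

-- ===== LEMMAS AND PROOFS =====

lemma pvTrits_zero (g : Nat) : pvTrits g 0 = [] := by cases g <;> simp [pvTrits]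

lemma pvDec2terAbs_ne_nil (f : Nat) (v : Int) : pvDec2terAbs f v ≠ [] := by
  cases f with
  | zero => simp [pvDec2terAbs]
  | succ f => simp only [pvDec2terAbs]; split <;> simp

-- core relation between A's recursion and B's loop, plus digit bounds
lemma pv_key (n : Nat) : ∀ v : Int, v.toNat = n → 0 < v → ∀ f g : Nat, v.toNat ≤ f → v.toNat ≤ g →
    pvDec2terAbs f v = (pvTrits g v).reverse ∧ ∀ t ∈ pvDec2terAbs f v, 0 ≤ t ∧ t < 3 := by
  induction n using Nat.strong_induction_on with
  | _ n IH =>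
    intro v hv hpos f g hf hg
    obtain ⟨f', rfl⟩ : ∃ f', f = f' + 1 := ⟨f - 1, by omega⟩
    obtain ⟨g', rfl⟩ : ∃ g', g = g' + 1 := ⟨g - 1, by omega⟩
    have hd : PySem.Int.floordiv v 3 = v / 3 := PySem.Int.floordiv_eq_ediv_of_pos (by norm_num)
    have hm : PySem.Int.mod v 3 = v % 3 := PySem.Int.mod_eq_emod_of_pos (by norm_num)
    by_cases h3 : v / 3 = 0
    · have : pvTrits g' (v / 3) = [] := by rw [h3]; exact pvTrits_zero g'
      simp only [pvDec2terAbs, pvTrits, hd, hm, h3, if_pos hpos]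
      constructor
      · simp [pvTrits_zero]
      · intro t ht; simp at ht; subst ht; constructor <;> omega
    · have hv3 : 3 ≤ v := by omega
      have hq : 0 < v / 3 := by omega
      have hlt : (v / 3).toNat < n := by omega
      have hfb : (v / 3).toNat ≤ f' := by omega
      have hgb : (v / 3).toNat ≤ g' := by omega
      obtain ⟨heq, hdig⟩ := IH _ hlt (v / 3) rfl hq f' g' hfb hgb
      simp only [pvDec2terAbs, pvTrits, hd, hm, h3, if_pos hpos]
      constructor
      · rw [heq]; simp
      · intro t ht
        rcases List.mem_append.mp ht with h | h
        · exact hdig t h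
        · simp at h; subst h; constructor <;> omega

lemma pv_fold_prepend (l : List Int) (L : List Char) :
    l.foldl (fun r _ => '0' :: r) L = List.replicate l.length '0' ++ L := by
  induction l generalizing L with
  | nil => simp
  | cons x t ih =>
      simp only [List.foldl_cons, ih, List.length_cons, List.replicate_succ']
      simp [List.append_assoc]

lemma pvDec2terstr_eq (l : List Int) : pvDec2terstr l = l.flatMap PySem.Int.toChars := by
  unfold pvDec2terstr; rw [PySem.List.foldl_append_eq_flatMap]; simp

lemma pv_temp_eq (v : Int) (hv : 0 ≤ v) :
    pvDec2terstr (pvDec2terAbs v.toNat v)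
      = (if pvTrits (v.toNat + 1) v = [] then ['0']
         else ((pvTrits (v.toNat + 1) v).reverse.map PySem.Int.toChars).flatten)
    ∧ pvDec2terstr (pvDec2terAbs v.toNat v) ≠ [] := by
  rcases lt_or_eq_of_le hv with hpos | hz
  · obtain ⟨heq, hdig⟩ := pv_key v.toNat v rfl hpos v.toNat (v.toNat + 1) le_rfl (by omega)
    have hds : pvTrits (v.toNat + 1) v ≠ [] := by
      intro h
      have hne := pvDec2terAbs_ne_nil v.toNat v
      rw [heq, h] at hne; simp at hne
    have hrevne : (pvTrits (v.toNat + 1) v).reverse ≠ [] := by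
      rw [← heq]; exact pvDec2terAbs_ne_nil v.toNat v
    rw [if_neg hds, pvDec2terstr_eq, heq, List.flatMap_def]
    refine ⟨rfl, ?_⟩
    obtain ⟨d, rest, hcons⟩ := List.exists_cons_of_ne_nil hrevne
    rw [hcons]
    have hdmem : d ∈ pvDec2terAbs v.toNat v := by rw [heq, hcons]; exact List.mem_cons_self
    obtain ⟨h0, h3⟩ := hdig d hdmem
    have htc : PySem.Int.toChars d ≠ [] := by interval_cases d <;> decide
    simp [htc]
  · rw [← hz]
    decide

theorem dec2terXtrit_spec : Claim_equal_dec2terXtrit := by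
  intro number ntrits _ hpre
  show dec2terXtrit number ntrits = dec2terXtrit_alt number ntrits
  unfold dec2terXtrit dec2terXtrit_alt pvDec2ter
  have main : ∀ v : Int, 0 ≤ v →
      (let temp := pvDec2terstr (pvDec2terAbs v.toNat v)
       let res : List Char := []
       let res := if temp.length > 0 then
           (PySem.List.pyRange (temp.length : Int) ntrits 1).foldl (fun r _ => '0' :: r) temp
         else res
       String.mk res)
      = (let ds := pvTrits (v.toNat + 1) v
         let s : List Char := if ds = [] then ['0'] else (ds.reverse.map PySem.Int.toChars).flatten
         String.mk (List.replicate (ntrits.toNat - s.length) '0' ++ s)) := by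
    intro v hv
    obtain ⟨hts, hne⟩ := pv_temp_eq v hv
    simp only [← hts, if_pos (List.length_pos_iff.mpr hne),
      gt_iff_lt, pv_fold_prepend, PySem.List.length_pyRange_one]
    have hlen : ((ntrits - ((pvDec2terstr (pvDec2terAbs v.toNat v)).length : Int)).toNat)
        = ntrits.toNat - (pvDec2terstr (pvDec2terAbs v.toNat v)).length := by omega
    rw [hlen]
  by_cases hn : number ≥ 0
  · simpa only [if_pos hn] using main number hn
  · have hv : 0 ≤ PySem.Int.floordiv ((3:Int) ^ ntrits.toNat - 1) 2 - number := by
      have h1 : 0 ≤ PySem.Int.floordiv ((3:Int) ^ ntrits.toNat - 1) 2 := by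
        rw [PySem.Int.floordiv_eq_ediv_of_pos (by norm_num)]
        have h2 : (1:Int) ≤ (3:Int) ^ ntrits.toNat := one_le_pow₀ (by norm_num)
        exact Int.ediv_nonneg (by omega) (by norm_num)
      omega
    simpa only [if_neg hn] using main _ hv
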